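-- pv_equiv track=rewrite | github.com/Intergalactic-Carpet/WallOS-Game-Engine | main.py | decimal_remover
-- ===== SOURCE A (Python) =====
-- def decimal_remover(num):
--     """
--     Removes the decimal and subsequent text from the string
--     :param num: The number to remove the decimal from
--     :return: The outputted number without a decimal
--     """
--     num = number_converter(num)
--     num_len = len(str(num))
--     output = ''
--     on = True
--     index = 0
--     for _ in range(num_len):
--         indexed = num[index]
--         if indexed == '.':
--             on = False
--         if on:
--             output = output + indexed
--         index += 1
--     return output
--
-- def number_converter(num_input):
--     """
--     Removes all characters except numbers and periods
--     :param num_input: String to convert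
--     :return: Number
--     """
--     num_input = str(num_input)
--     num_len = len(num_input)
--     allowed_chars = '1234567890.'
--     chars_length = len(allowed_chars)
--     index = 0
--     output = ''
--     for _ in range(num_len):
--         indexed = num_input[index]
--         index_2 = 0
--         for i in range(chars_length):
--             second_indexed = allowed_chars[index_2]
--             if indexed in second_indexed:
--                 output = output + indexed
--             index_2 += 1
--         index += 1
--     return output
-- ===== SOURCE B (Python) =====
-- def decimal_remover(num):
--     """
--     Removes the decimal and subsequent text from the string
--     :param num: The number to remove the decimal from
--     :return: The outputted number without a decimal
--     """
--     s = str(num)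
--     output = ''
--     for c in s:
--         if c == '.':
--             break
--         if c in '0123456789':
--             output += c
--     return output
-- ===== Notes on version B (the rewrite author's own statement) =====
-- stated objective: simpler
-- what changed: Replaced A's two-helper pipeline (filter every char through an 11-way inner scan, then a second flag-carrying pass over the filtered string) with one self-contained early-terminating pass that breaks at the first period and appends literal ASCII digits.
import Mathlib
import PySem

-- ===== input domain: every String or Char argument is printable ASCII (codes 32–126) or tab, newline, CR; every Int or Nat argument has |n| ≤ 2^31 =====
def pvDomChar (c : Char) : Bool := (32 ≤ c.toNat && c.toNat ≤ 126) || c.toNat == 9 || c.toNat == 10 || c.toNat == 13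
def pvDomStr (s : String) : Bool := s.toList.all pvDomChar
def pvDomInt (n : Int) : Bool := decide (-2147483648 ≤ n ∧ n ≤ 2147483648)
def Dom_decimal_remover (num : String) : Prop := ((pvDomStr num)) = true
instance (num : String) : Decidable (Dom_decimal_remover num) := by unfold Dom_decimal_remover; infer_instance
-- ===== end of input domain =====

-- B replaces A's filter-everything-then-rescan two-helper pipeline with one self-contained
-- early-terminating pass (break at the first '.', append literal digits); same return value.

-- ===== PORT A =====
-- number_converter: for each char of the input, scan the 11 allowed chars; 'indexed in second_indexed'
-- on two single-char strings is exactly character equality (substring test on 1-char strings).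
def number_converter (num_input : String) : String :=
  String.ofList
    (num_input.toList.foldl
      (fun output indexed =>
        ("1234567890.".toList).foldl
          (fun output second_indexed =>
            if indexed = second_indexed then output ++ [indexed] else output)
          output)
      [])

-- loop body of A's second pass: state (output, on); check '.' first, then conditionally append
def drStep (st : List Char × Bool) (indexed : Char) : List Char × Bool :=
  let on := if indexed = '.' then false else st.2
  (if on then st.1 ++ [indexed] else st.1, on)

-- decimal_remover: indexes num[0..len-1] in order carrying (output, on); sequential indexing is the fold.
def decimal_remover (num : String) : String :=
  String.ofList ((number_converter num).toList.foldl drStep ([], true)).1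

-- ===== PORT B =====
-- one pass: break at the first '.', keep literal ASCII digits
def drAltLoop : List Char → List Char
  | [] => []
  | c :: cs =>
      if c = '.' then []
      else if c ∈ "0123456789".toList then c :: drAltLoop cs
      else drAltLoop cs

def decimal_remover_alt (num : String) : String :=
  String.ofList (drAltLoop num.toList)

-- ===== PRECONDITION & SPEC =====
def Spec_decimal_remover (num : String) (out : String) : Prop := out = decimal_remover_alt num
instance (num : String) (out : String) : Decidable (Spec_decimal_remover num out) := by unfold Spec_decimal_remover; infer_instance

-- ===== CLAIM (what is proved, stated in full; the proofs are below) =====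
def Claim_equal_decimal_remover : Prop := ∀ (num : String), Dom_decimal_remover num → Spec_decimal_remover num (decimal_remover num)

-- ===== LEMMAS AND PROOFS =====

-- the filtered list number_converter produces, recursively
def drFilt : List Char → List Char
  | [] => []
  | c :: cs => (if c ∈ "1234567890.".toList then [c] else []) ++ drFilt cs

lemma drL1 : "1234567890.".toList = ['1','2','3','4','5','6','7','8','9','0','.'] := rfl
lemma drL2 : "0123456789".toList = ['0','1','2','3','4','5','6','7','8','9'] := rfl

-- a fold of "append c on match" over a duplicate-free list appends c iff c is a member
lemma dr_scan (c : Char) (l : List Char) (hnd : l.Nodup) (out : List Char) :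
    l.foldl (fun output a => if c = a then output ++ [c] else output) out
    = out ++ (if c ∈ l then [c] else []) := by
  induction l generalizing out with
  | nil => simp
  | cons a l ih =>
    have hnd' : l.Nodup := hnd.of_cons
    by_cases h : c = a
    · subst h
      have hnm : c ∉ l := (List.nodup_cons.mp hnd).1
      simp [List.foldl, ih hnd', hnm]
    · simp [List.foldl, h, ih hnd']

-- number_converter's fold computes drFilt
lemma dr_nc_fold (cs : List Char) (out : List Char) :
    cs.foldl
      (fun output indexed =>
        ("1234567890.".toList).foldl
          (fun output a => if indexed = a then output ++ [indexed] else output) output)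
      out
    = out ++ drFilt cs := by
  induction cs generalizing out with
  | nil => simp [drFilt]
  | cons c cs ih =>
    rw [List.foldl_cons, dr_scan c _ (by rw [drL1]; decide), ih]
    simp [drFilt]

lemma drStep_dot (st : List Char × Bool) : drStep st '.' = (st.1, false) := by
  simp [drStep]

lemma drStep_off (out : List Char) (c : Char) : drStep (out, false) c = (out, false) := by
  simp [drStep]

lemma drStep_on {c : Char} (h : ¬ c = '.') (out : List Char) :
    drStep (out, true) c = (out ++ [c], true) := by
  simp [drStep, h]

-- once on = false, the fold never changes the state
lemma dr_off (l : List Char) (out : List Char) :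
    l.foldl drStep (out, false) = (out, false) := by
  induction l generalizing out with
  | nil => rfl
  | cons c cs ih => rw [List.foldl_cons, drStep_off, ih]

lemma dr_mem_filt (c : Char) :
    c ∈ "1234567890.".toList ↔ (c = '.' ∨ c ∈ "0123456789".toList) := by
  rw [drL1, drL2]
  simp
  tauto

-- main invariant: folding A's second pass over the filtered list equals B's single pass
lemma dr_main (cs : List Char) (out : List Char) :
    ((drFilt cs).foldl drStep (out, true)).1 = out ++ drAltLoop cs := by
  induction cs generalizing out with
  | nil => simp [drFilt, drAltLoop]
  | cons c cs ih =>
    simp only [drFilt]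
    by_cases hd : c = '.'
    · subst hd
      rw [if_pos (show ('.' ∈ "1234567890.".toList) by rw [drL1]; decide)]
      rw [List.singleton_append, List.foldl_cons, drStep_dot, dr_off]
      simp [drAltLoop]
    · by_cases hdig : c ∈ "0123456789".toList
      · rw [if_pos ((dr_mem_filt c).mpr (Or.inr hdig))]
        rw [List.singleton_append, List.foldl_cons, drStep_on hd, ih]
        simp only [drAltLoop]
        rw [if_neg hd, if_pos hdig]
        simp
      · have hm : c ∉ "1234567890.".toList := by
          intro h
          rcases (dr_mem_filt c).mp h with h' | h'
          · exact hd h'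
          · exact hdig h'
        rw [if_neg hm, List.nil_append, ih]
        simp only [drAltLoop]
        rw [if_neg hd, if_neg hdig]

-- ===== VERDICT (by name: the statement is the Claim_ definition above) =====
theorem decimal_remover_spec : Claim_equal_decimal_remover := by
  intro num _
  show decimal_remover num = decimal_remover_alt num
  unfold decimal_remover decimal_remover_alt number_converter
  rw [dr_nc_fold, List.nil_append, String.toList_ofList, dr_main, List.nil_append]
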